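-- pv_equiv track=rewrite | github.com/abdulaziz-python/cop-bot | handlers/admin.py | format_hashtags_for_announcement
-- ===== SOURCE A (Python) =====
-- def format_hashtags_for_announcement(technologies):
--     if not technologies:
--         return ""
--
--     tech_list = technologies.replace("'", " ").replace("-", " ").split(",")
--     cleaned_tech_list = []
--
--     for tech in tech_list:
--         cleaned_techs = tech.strip().split()
--         for t in cleaned_techs:
--             if t.strip():
--                 cleaned_tech_list.append(t.strip())
--
--     hashtags = " ".join([f"#{tech.lower()}" for tech in cleaned_tech_list if tech])
--     return hashtags
-- ===== SOURCE B (Python) =====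
-- def format_hashtags_for_announcement(technologies):
--     if not technologies:
--         return ""
--     out = ""
--     in_token = False
--     for ch in technologies:
--         if ch in " \t\n\r\x0b\x0c,'-":
--             in_token = False
--         else:
--             if not in_token:
--                 out += "#" if not out else " #"
--                 in_token = True
--             out += ch.lower()
--     return out
-- ===== Notes on version B (the rewrite author's own statement) =====
-- stated objective: alternative
-- what changed: Replaces A's split/strip/join pipeline (comma-split, per-piece whitespace-split, collect tokens, then join hashtags) with a single character-by-character state machine that carries an in_token flag and writes the output string directly, never materialising any token list.
import Mathlib
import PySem

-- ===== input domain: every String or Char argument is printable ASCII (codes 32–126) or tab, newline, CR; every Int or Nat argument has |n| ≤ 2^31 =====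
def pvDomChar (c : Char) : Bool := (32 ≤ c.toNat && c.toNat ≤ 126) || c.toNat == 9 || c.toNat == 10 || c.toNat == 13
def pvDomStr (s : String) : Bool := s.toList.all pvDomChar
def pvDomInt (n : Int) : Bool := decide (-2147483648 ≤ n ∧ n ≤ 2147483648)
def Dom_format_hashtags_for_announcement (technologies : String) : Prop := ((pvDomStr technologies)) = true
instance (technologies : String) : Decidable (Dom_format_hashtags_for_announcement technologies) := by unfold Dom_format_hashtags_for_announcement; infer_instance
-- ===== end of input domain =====

-- B replaces A's split/strip/join pipeline by one character-at-a-time state machine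
-- (an in_token flag, output written directly); objective: alternative decomposition.

-- ===== PORT A =====
def format_hashtags_for_announcement (technologies : String) : String :=
  if technologies = "" then ""
  else
    let tech_list := (PySem.Str.split? (PySem.Str.replace (PySem.Str.replace technologies "'" " ") "-" " ") ",").getD []
    let cleaned_tech_list := tech_list.foldl (fun acc tech =>
      (PySem.Str.split₀ (PySem.Str.strip tech)).foldl (fun acc2 t =>
        if PySem.Str.strip t ≠ "" then acc2 ++ [PySem.Str.strip t] else acc2) acc) []
    PySem.Str.join " " ((cleaned_tech_list.filter (fun tech => tech ≠ "")).map (fun tech => "#" ++ PySem.Str.lower tech))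

-- ===== PORT B =====
-- separator test of Source B: `ch in " \t\n\r\x0b\x0c,'-"`
def pvSepB (c : Char) : Bool := c ∈ ([' ', '\t', '\n', '\r', '\x0b', '\x0c', ',', '\'', '-'] : List Char)

-- Source B's loop; the growing Python string `out` is ported as a List Char (appended at the
-- right end, exactly as `out += …`), turned into a String once at the end.
def format_hashtags_for_announcement_alt (technologies : String) : String :=
  if technologies = "" then ""
  else
    let st := technologies.toList.foldl (fun (st : List Char × Bool) ch =>
      if pvSepB ch then (st.1, false)
      else
        let out := if st.2 then st.1 else st.1 ++ (if st.1.isEmpty then ['#'] else [' ', '#'])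
        (out ++ [PySem.Chars.lowerChar ch], true)) ([], false)
    String.ofList st.1

-- ===== PRECONDITION & SPEC =====
def Spec_format_hashtags_for_announcement (technologies : String) (out : String) : Prop := out = format_hashtags_for_announcement_alt technologies
instance (technologies : String) (out : String) : Decidable (Spec_format_hashtags_for_announcement technologies out) := by unfold Spec_format_hashtags_for_announcement; infer_instance

-- ===== CLAIM (what is proved, stated in full; the proofs are below) =====
def Claim_equal_format_hashtags_for_announcement : Prop := ∀ (technologies : String), Dom_format_hashtags_for_announcement technologies → Spec_format_hashtags_for_announcement technologies (format_hashtags_for_announcement technologies)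

-- ===== LEMMAS AND PROOFS =====

-- Python `s.split()` as plain structural recursion: the whitespace-separated words of a char list.
def pvWords : List Char → List (List Char)
  | [] => []
  | c :: rest =>
    if PySem.Chars.isspace c then pvWords rest
    else (c :: rest.takeWhile (fun d => !PySem.Chars.isspace d)) ::
         pvWords (rest.dropWhile (fun d => !PySem.Chars.isspace d))
termination_by l => l.length
decreasing_by
  · simp
  · have := List.length_dropWhile_le (p := fun d => !PySem.Chars.isspace d) (l := rest)
    simp
    omega

-- Python `s.split(',')` as plain structural recursion.
def pvCommaSplit : List Char → List (List Char)
  | [] => [[]]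
  | c :: rest =>
    if c = ',' then [] :: pvCommaSplit rest
    else (c :: (pvCommaSplit rest).headI) :: (pvCommaSplit rest).tail

def pvSub (t : Char) (c : Char) : Char := if c = t then ' ' else c

-- the separator-delimited tokens of the input, B's view of the string
def pvTokens : List Char → List (List Char)
  | [] => []
  | c :: rest =>
    if pvSepB c then pvTokens rest
    else (c :: rest.takeWhile (fun d => !pvSepB d)) ::
         pvTokens (rest.dropWhile (fun d => !pvSepB d))
termination_by l => l.length
decreasing_by
  · simp
  · have := List.length_dropWhile_le (p := fun d => !pvSepB d) (l := rest)
    simp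
    omega

-- what B's state machine emits for a token list
def pvRender (first : Bool) : List (List Char) → List Char
  | [] => []
  | t :: ts =>
    (if first then ['#'] else [' ', '#']) ++ PySem.Chars.lower t ++ pvRender false ts

lemma pvCommaSplit_ne_nil (l : List Char) : pvCommaSplit l ≠ [] := by
  cases l <;> simp [pvCommaSplit] <;> split <;> simp

lemma pvHeadI_tail {α : Type} [Inhabited α] (l : List α) (h : l ≠ []) : l.headI :: l.tail = l := by
  cases l with
  | nil => exact absurd rfl h
  | cons a b => rfl

-- single-character str.replace is a map over the characters
lemma pvReplace_go_spec (o n : Char) (fuel : Nat) : ∀ (l acc : List Char), l.length ≤ fuel →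
    PySem.Chars.replace.go [o] [n] fuel l acc
      = acc.reverse ++ l.map (fun c => if c = o then n else c) := by
  induction fuel with
  | zero =>
    intro l acc h
    have : l = [] := by cases l <;> simp_all
    subst this; simp [PySem.Chars.replace.go]
  | succ m ih =>
    intro l acc h
    cases l with
    | nil => simp [PySem.Chars.replace.go]
    | cons c t =>
      rw [PySem.Chars.replace.go]
      simp only [List.isPrefixOf, List.length_cons, List.length_nil, List.drop_succ_cons, List.drop_zero]
      by_cases hc : c = o
      · simp only [hc, beq_self_eq_true, Bool.true_and, if_pos]
        rw [ih t _ (by simpa using h)]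
        simp
      · have hne : (o == c) = false := by simp; exact fun e => hc e.symm
        simp only [hne, Bool.false_and, Bool.false_eq_true, if_neg, not_false_iff]
        rw [ih t _ (by simpa using h)]
        simp [hc]

lemma pvReplace_single (o n : Char) (l : List Char) :
    PySem.Chars.replace l [o] [n] = l.map (fun c => if c = o then n else c) := by
  rw [PySem.Chars.replace]
  simp only [List.isEmpty_cons, Bool.false_eq_true, if_neg, not_false_iff]
  rw [pvReplace_go_spec o n l.length l [] (le_refl _)]
  simp

-- str.split(',') computes pvCommaSplit
lemma pvSplitOn_comma_go (fuel : Nat) : ∀ (l cur : List Char) (acc : List (List Char)), l.length ≤ fuel →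
    PySem.Chars.splitOn.go [','] fuel l cur acc
      = acc.reverse ++ (cur.reverse ++ (pvCommaSplit l).headI) :: (pvCommaSplit l).tail := by
  induction fuel with
  | zero =>
    intro l cur acc h
    have : l = [] := by cases l <;> simp_all
    subst this; simp [PySem.Chars.splitOn.go, pvCommaSplit]
  | succ m ih =>
    intro l cur acc h
    cases l with
    | nil => simp [PySem.Chars.splitOn.go, pvCommaSplit]
    | cons c t =>
      rw [PySem.Chars.splitOn.go]
      by_cases hc : c = ','
      · simp only [hc, List.isPrefixOf, beq_self_eq_true, Bool.true_and, if_pos,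
          List.length_cons, List.length_nil, List.drop_succ_cons, List.drop_zero]
        rw [ih t [] (cur.reverse :: acc) (by simpa using h)]
        simp [pvCommaSplit]
        try exact pvHeadI_tail _ (pvCommaSplit_ne_nil t)
      · have hne : (',' == c) = false := by simp; exact fun e => hc e.symm
        simp only [List.isPrefixOf, hne, Bool.false_and, Bool.false_eq_true, if_neg, not_false_iff]
        rw [ih t (c :: cur) acc (by simpa using h)]
        simp [pvCommaSplit, hc]

lemma pvSplitOn_comma (l : List Char) : PySem.Chars.splitOn l [','] = pvCommaSplit l := by
  rw [PySem.Chars.splitOn, pvSplitOn_comma_go (l.length + 1) l [] [] (by omega)]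
  simpa using pvHeadI_tail _ (pvCommaSplit_ne_nil l)

-- str.split() computes pvWords
lemma pvSplit₀_go_spec : ∀ (l cur : List Char) (acc : List (List Char)),
    (∀ c ∈ cur, PySem.Chars.isspace c = false) →
    PySem.Chars.split₀.go l cur acc
      = acc.reverse ++ (if cur.isEmpty then pvWords l
          else (cur.reverse ++ l.takeWhile (fun d => !PySem.Chars.isspace d)) ::
               pvWords (l.dropWhile (fun d => !PySem.Chars.isspace d))) := by
  intro l
  induction l with
  | nil =>
    intro cur acc hcur
    cases cur <;> simp [PySem.Chars.split₀.go, pvWords]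
  | cons c rest ih =>
    intro cur acc hcur
    rw [PySem.Chars.split₀.go]
    by_cases hs : PySem.Chars.isspace c
    · simp only [hs, if_pos]
      cases cur with
      | nil =>
        simp only [List.isEmpty_nil, if_pos]
        rw [ih [] acc (by simp)]
        simp [pvWords, hs]
      | cons d ds =>
        simp only [List.isEmpty_cons, Bool.false_eq_true, if_neg, not_false_iff]
        rw [ih [] ((d::ds).reverse :: acc) (by simp)]
        simp [pvWords, hs]
    · simp only [hs, if_neg, Bool.false_eq_true, not_false_iff]
      rw [ih (c :: cur) acc (by
        intro x hx
        cases List.mem_cons.mp hx with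
        | inl h1 => subst h1; simpa using hs
        | inr h2 => exact hcur _ h2)]
      cases cur with
      | nil => simp [pvWords, hs]
      | cons d ds => simp [pvWords, hs]

lemma pvSplit₀_eq_words (l : List Char) : PySem.Chars.split₀ l = pvWords l := by
  rw [PySem.Chars.split₀, pvSplit₀_go_spec l [] [] (by simp)]
  simp

lemma pvWords_all_space : ∀ (t : List Char), (∀ c ∈ t, PySem.Chars.isspace c = true) → pvWords t = [] := by
  intro t
  induction t with
  | nil => intro _; simp [pvWords]
  | cons c r ih =>
    intro h
    rw [pvWords, if_pos (h c (by simp))]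
    exact ih (fun x hx => h x (by simp [hx]))

lemma pvWords_append_space (d : Char) (hd : PySem.Chars.isspace d = true) (n : Nat) :
    ∀ (xs ys : List Char), xs.length ≤ n →
    pvWords (xs ++ d :: ys) = pvWords xs ++ pvWords ys := by
  induction n with
  | zero =>
    intro xs ys h
    have : xs = [] := by cases xs <;> simp_all
    subst this
    simp [pvWords, hd]
  | succ m ih =>
    intro xs ys h
    cases xs with
    | nil =>
      simp [pvWords, hd]
    | cons c t =>
      simp only [List.cons_append]
      rw [pvWords, pvWords]
      by_cases hs : PySem.Chars.isspace c
      · rw [if_pos hs, if_pos hs, ih t ys (by simpa using h)]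
      · rw [if_neg hs, if_neg hs]
        rw [List.takeWhile_append, List.dropWhile_append]
        by_cases hdw : (List.dropWhile (fun d => !PySem.Chars.isspace d) t).isEmpty
        · have hdnil : List.dropWhile (fun d => !PySem.Chars.isspace d) t = [] := by
            simpa [List.isEmpty_iff] using hdw
          have hall := List.dropWhile_eq_nil_iff.mp hdnil
          have htk2 : List.takeWhile (fun d => !PySem.Chars.isspace d) t = t :=
            List.takeWhile_eq_self_iff.mpr hall
          have htk : (List.takeWhile (fun d => !PySem.Chars.isspace d) t).length = t.length := by
            rw [htk2]
          rw [if_pos htk, if_pos hdw, hdnil, htk2]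
          simp [pvWords, hd]
        · have htk : ¬ (List.takeWhile (fun d => !PySem.Chars.isspace d) t).length = t.length := by
            intro he
            have h1 : List.takeWhile (fun d => !PySem.Chars.isspace d) t = t :=
              List.IsPrefix.eq_of_length (List.takeWhile_prefix _) he
            have h2 := List.dropWhile_eq_nil_iff.mpr (List.takeWhile_eq_self_iff.mp h1)
            simp [h2] at hdw
          rw [if_neg htk, if_neg (by simpa using hdw)]
          have hlen : (List.dropWhile (fun d => !PySem.Chars.isspace d) t).length ≤ m := by
            have := List.length_dropWhile_le (p := fun d => !PySem.Chars.isspace d) (l := t)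
            simp at h; omega
          rw [ih _ ys hlen]; simp

lemma pvWords_append_spaces : ∀ (t : List Char), (∀ c ∈ t, PySem.Chars.isspace c = true) →
    ∀ xs, pvWords (xs ++ t) = pvWords xs := by
  intro t
  induction t with
  | nil => intro _ xs; simp
  | cons c r ih =>
    intro h xs
    rw [pvWords_append_space c (h c (by simp)) xs.length xs r (le_refl _)]
    rw [pvWords_all_space r (fun x hx => h x (by simp [hx]))]
    simp

lemma pvWords_lstrip : ∀ (l : List Char), pvWords (PySem.Chars.lstrip l) = pvWords l := by
  intro l
  induction l with
  | nil => rfl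
  | cons c r ih =>
    by_cases hs : PySem.Chars.isspace c
    · rw [PySem.Chars.lstrip, List.dropWhile_cons_of_pos hs]
      rw [show List.dropWhile PySem.Chars.isspace r = PySem.Chars.lstrip r from rfl, ih]
      rw [pvWords, if_pos hs]
    · rw [PySem.Chars.lstrip, List.dropWhile_cons_of_neg (by simpa using hs)]

lemma pvWords_rstrip (l : List Char) : pvWords (PySem.Chars.rstrip l) = pvWords l := by
  have hdec : l = PySem.Chars.rstrip l ++ (List.takeWhile PySem.Chars.isspace l.reverse).reverse := by
    rw [PySem.Chars.rstrip]
    rw [← List.reverse_append, List.takeWhile_append_dropWhile, List.reverse_reverse]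
  conv_rhs => rw [hdec]
  rw [pvWords_append_spaces _ (by
    intro c hc
    simp only [List.mem_reverse] at hc
    exact List.mem_takeWhile_imp hc) _]

lemma pvWords_strip (l : List Char) : pvWords (PySem.Chars.strip l) = pvWords l := by
  rw [PySem.Chars.strip, pvWords_rstrip, pvWords_lstrip]

lemma pvWords_mem : ∀ (l t : List Char), t ∈ pvWords l →
    t ≠ [] ∧ ∀ c ∈ t, PySem.Chars.isspace c = false := by
  intro l
  induction l using pvWords.induct with
  | case1 => intro t ht; simp [pvWords] at ht
  | case2 c rest hs ih =>
    intro t ht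
    rw [pvWords, if_pos hs] at ht
    exact ih t ht
  | case3 c rest hs ih =>
    intro t ht
    rw [pvWords, if_neg hs] at ht
    cases List.mem_cons.mp ht with
    | inl h1 =>
      subst h1
      refine ⟨by simp, ?_⟩
      intro x hx
      cases List.mem_cons.mp hx with
      | inl h2 => subst h2; simpa using hs
      | inr h3 => simpa using List.mem_takeWhile_imp h3
    | inr h2 => exact ih t h2

lemma pvDropWhile_nospace (x : List Char) (hx : ∀ c ∈ x, PySem.Chars.isspace c = false) :
    List.dropWhile PySem.Chars.isspace x = x := by
  cases x with
  | nil => rfl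
  | cons a b => exact List.dropWhile_cons_of_neg (by simp [hx a (by simp)])

lemma pvStrip_nospace (t : List Char) (h : ∀ c ∈ t, PySem.Chars.isspace c = false) :
    PySem.Chars.strip t = t := by
  have hl : PySem.Chars.lstrip t = t := pvDropWhile_nospace t h
  have hr : PySem.Chars.rstrip t = t := by
    rw [PySem.Chars.rstrip, pvDropWhile_nospace _ (by intro c hc; exact h c (List.mem_reverse.mp hc)), List.reverse_reverse]
  rw [PySem.Chars.strip, hl, hr]

lemma pvCs_no_comma : ∀ (l : List Char), (∀ c ∈ l, c ≠ ',') → pvCommaSplit l = [l] := by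
  intro l
  induction l with
  | nil => intro _; rfl
  | cons c r ih =>
    intro h
    rw [pvCommaSplit, if_neg (h c (by simp)), ih (fun x hx => h x (by simp [hx]))]
    simp

lemma pvCs_append : ∀ (xs ys : List Char), (∀ c ∈ xs, c ≠ ',') →
    pvCommaSplit (xs ++ ',' :: ys) = xs :: pvCommaSplit ys := by
  intro xs
  induction xs with
  | nil => intro ys _; simp [pvCommaSplit]
  | cons c r ih =>
    intro ys h
    simp only [List.cons_append]
    rw [pvCommaSplit, if_neg (h c (by simp)), ih ys (fun x hx => h x (by simp [hx]))]
    simp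

lemma pvMap_sub_nc (xs : List Char) (h : ∀ c ∈ xs, c ≠ ',') :
    xs.map (pvSub ',') = xs := by
  rw [List.map_congr_left (g := id) (by intro x hx; simp [pvSub, h x hx]), List.map_id]

lemma pvDropWhile_head_false {α : Type} (p : α → Bool) :
    ∀ (l : List α) (a : α) (as : List α), l.dropWhile p = a :: as → p a = false := by
  intro l
  induction l with
  | nil => intro a as h; simp [List.dropWhile] at h
  | cons c r ih =>
    intro a as h
    by_cases hp : p c
    · rw [List.dropWhile_cons_of_pos hp] at h; exact ih a as h
    · rw [List.dropWhile_cons_of_neg hp] at h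
      cases h
      simpa using hp

-- comma-split then word-split = word-split after mapping ',' to ' '
lemma pvTokenize (n : Nat) : ∀ (l : List Char), l.length ≤ n →
    (pvCommaSplit l).flatMap pvWords = pvWords (l.map (pvSub ',')) := by
  induction n with
  | zero =>
    intro l h
    have : l = [] := by cases l <;> simp_all
    subst this
    simp [pvCommaSplit, pvWords]
  | succ m ih =>
    intro l h
    by_cases hc : ',' ∈ l
    · have hdec := List.takeWhile_append_dropWhile (p := fun c => decide (c ≠ ',')) (l := l)
      have hxsnc : ∀ c ∈ List.takeWhile (fun c => decide (c ≠ ',')) l, c ≠ ',' := by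
        intro c hcx
        simpa using List.mem_takeWhile_imp hcx
      cases hr : List.dropWhile (fun c => decide (c ≠ ',')) l with
      | nil =>
        have hall := List.dropWhile_eq_nil_iff.mp hr
        simpa using hall ',' hc
      | cons a as =>
        have ha : a = ',' := by
          have := pvDropWhile_head_false _ l a as hr
          simpa using this
        subst ha
        rw [hr] at hdec
        rw [← hdec]
        rw [pvCs_append _ as hxsnc]
        have hlen : as.length ≤ m := by
          have h2 := congrArg List.length hdec
          simp at h2
          omega
        rw [List.flatMap_cons, ih as hlen]
        rw [List.map_append, List.map_cons, pvMap_sub_nc _ hxsnc]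
        have hss : pvSub ',' ',' = ' ' := by simp [pvSub]
        rw [hss]
        rw [pvWords_append_space ' ' (by decide) (List.takeWhile (fun c => decide (c ≠ ',')) l).length _ _ (le_refl _)]
    · rw [pvCs_no_comma l (fun c hcl => by rintro rfl; exact hc hcl)]
      rw [pvMap_sub_nc l (fun c hcl => by rintro rfl; exact hc hcl)]
      simp

lemma pvToListInj : Function.Injective String.toList := fun a b h => String.toList_inj.mp h

-- the words of a stripped piece, at the String level
lemma pvWs (tech : String) :
    List.map String.toList (PySem.Str.split₀ (PySem.Str.strip tech)) = pvWords tech.toList := by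
  rw [PySem.Str.split₀, List.map_map]
  rw [show String.toList ∘ String.ofList = id from funext (fun l => String.toList_ofList (l := l)), List.map_id]
  rw [PySem.Str.toList_strip, pvSplit₀_eq_words, pvWords_strip]

-- inside a stripped piece, every word is nonempty and whitespace-free, so the
-- strip-and-filter loop body is the identity
lemma pvPieceMem (tech w : String) (hw : w ∈ PySem.Str.split₀ (PySem.Str.strip tech)) :
    PySem.Str.strip w = w ∧ w ≠ "" := by
  have hmem : w.toList ∈ pvWords tech.toList := by
    rw [← pvWs tech]
    exact List.mem_map_of_mem hw
  obtain ⟨hne, hnsp⟩ := pvWords_mem tech.toList w.toList hmem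
  constructor
  · apply pvToListInj
    rw [PySem.Str.toList_strip, pvStrip_nospace _ hnsp]
  · intro he
    subst he
    exact hne rfl

lemma pvPiece (tech : String) :
    ((PySem.Str.split₀ (PySem.Str.strip tech)).filter
        (fun t => decide (PySem.Str.strip t ≠ ""))).map (fun t => PySem.Str.strip t)
      = PySem.Str.split₀ (PySem.Str.strip tech) := by
  rw [List.filter_eq_self.mpr (by
    intro w hw
    obtain ⟨hs, hne⟩ := pvPieceMem tech w hw
    simp [hs, hne])]
  rw [List.map_congr_left (g := id) (by
    intro w hw
    obtain ⟨hs, _⟩ := pvPieceMem tech w hw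
    simp [hs]), List.map_id]

-- A's inner append loop, in closed form
lemma pvInnerFold (ws acc : List String) :
    ws.foldl (fun acc2 t => if PySem.Str.strip t ≠ "" then acc2 ++ [PySem.Str.strip t] else acc2) acc
      = acc ++ (ws.filter (fun t => decide (PySem.Str.strip t ≠ ""))).map (fun t => PySem.Str.strip t) := by
  rw [show (fun (acc2 : List String) t => if PySem.Str.strip t ≠ "" then acc2 ++ [PySem.Str.strip t] else acc2)
        = (fun acc2 t => if (decide (PySem.Str.strip t ≠ "")) = true then acc2 ++ [PySem.Str.strip t] else acc2) from by
    funext acc2 t; simp]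
  exact PySem.List.foldl_append_if _ _ ws acc

-- the composite of A's three single-character replaces
def pvSub3 (c : Char) : Char := pvSub ',' (pvSub '-' (pvSub '\'' c))

lemma pvSub3_id (c : Char) (h : pvSepB c = false) : pvSub3 c = c := by
  simp only [pvSepB, List.mem_cons, List.not_mem_nil, or_false, decide_eq_false_iff_not,
    not_or] at h
  obtain ⟨-, -, -, -, -, -, h7, h8, h9⟩ := h
  simp [pvSub3, pvSub, h7, h8, h9]

-- on domain chars, B's separator test is exactly "the replaced char is whitespace"
lemma pvSep_iff (c : Char) (hc : pvDomChar c = true) :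
    PySem.Chars.isspace (pvSub3 c) = pvSepB c := by
  by_cases hsep : pvSepB c = true
  · have : c = ' ' ∨ c = '\t' ∨ c = '\n' ∨ c = '\r' ∨ c = '\x0b' ∨ c = '\x0c' ∨
        c = ',' ∨ c = '\'' ∨ c = '-' := by
      simpa [pvSepB] using hsep
    rw [hsep]
    rcases this with h|h|h|h|h|h|h|h|h <;> subst h <;> decide
  · rw [Bool.not_eq_true] at hsep
    rw [hsep, pvSub3_id c hsep]
    have hne : c ≠ ' ' ∧ c ≠ '\t' ∧ c ≠ '\n' ∧ c ≠ '\r' := by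
      simp only [pvSepB, List.mem_cons, List.not_mem_nil, or_false,
        decide_eq_false_iff_not, not_or] at hsep
      exact ⟨hsep.1, hsep.2.1, hsep.2.2.1, hsep.2.2.2.1⟩
    have hnum : 33 ≤ c.toNat ∧ c.toNat ≤ 126 := by
      have e32 : c.toNat ≠ 32 := fun h => hne.1 (by
        have := Char.ofNat_toNat c; rw [h] at this; exact this.symm)
      have e9 : c.toNat ≠ 9 := fun h => hne.2.1 (by
        have := Char.ofNat_toNat c; rw [h] at this; exact this.symm)
      have e10 : c.toNat ≠ 10 := fun h => hne.2.2.1 (by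
        have := Char.ofNat_toNat c; rw [h] at this; exact this.symm)
      have e13 : c.toNat ≠ 13 := fun h => hne.2.2.2 (by
        have := Char.ofNat_toNat c; rw [h] at this; exact this.symm)
      simp only [pvDomChar, Bool.or_eq_true, Bool.and_eq_true, decide_eq_true_eq,
        beq_iff_eq] at hc
      omega
    refine Bool.eq_false_iff.mpr ?_
    intro habs
    simp only [PySem.Chars.isspace, Bool.or_eq_true, Bool.and_eq_true, decide_eq_true_eq] at habs
    omega

-- on domain chars, tokens survive the replaces unchanged
lemma pvTW (l : List Char) (h : ∀ c ∈ l, pvDomChar c = true) :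
    (l.map pvSub3).takeWhile (fun d => !PySem.Chars.isspace d)
      = l.takeWhile (fun d => !pvSepB d) := by
  induction l with
  | nil => rfl
  | cons c r ih =>
    have hiff := pvSep_iff c (h c (by simp))
    by_cases hs : pvSepB c = true
    · rw [List.map_cons, List.takeWhile_cons_of_neg (by simp [hiff, hs]),
        List.takeWhile_cons_of_neg (by simp [hs])]
    · rw [Bool.not_eq_true] at hs
      rw [List.map_cons, List.takeWhile_cons_of_pos (by simp [hiff, hs]),
        List.takeWhile_cons_of_pos (by simp [hs]), pvSub3_id c hs,
        ih (fun x hx => h x (by simp [hx]))]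

lemma pvDW (l : List Char) (h : ∀ c ∈ l, pvDomChar c = true) :
    (l.map pvSub3).dropWhile (fun d => !PySem.Chars.isspace d)
      = (l.dropWhile (fun d => !pvSepB d)).map pvSub3 := by
  induction l with
  | nil => rfl
  | cons c r ih =>
    have hiff := pvSep_iff c (h c (by simp))
    by_cases hs : pvSepB c = true
    · rw [List.map_cons, List.dropWhile_cons_of_neg (by simp [hiff, hs]),
        List.dropWhile_cons_of_neg (by simp [hs]), List.map_cons]
    · rw [Bool.not_eq_true] at hs
      rw [List.map_cons, List.dropWhile_cons_of_pos (by simp [hiff, hs]),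
        List.dropWhile_cons_of_pos (by simp [hs]), ih (fun x hx => h x (by simp [hx]))]

-- word-split of the replaced string = B's token split of the original
lemma pvTokens_eq (n : Nat) : ∀ (l : List Char), l.length ≤ n →
    (∀ c ∈ l, pvDomChar c = true) → pvWords (l.map pvSub3) = pvTokens l := by
  induction n with
  | zero =>
    intro l hl _
    have : l = [] := by cases l <;> simp_all
    subst this
    simp [pvWords, pvTokens]
  | succ m ih =>
    intro l hl hd
    cases l with
    | nil => simp [pvWords, pvTokens]
    | cons c r =>
      have hiff := pvSep_iff c (hd c (by simp))
      have hdr : ∀ x ∈ r, pvDomChar x = true := fun x hx => hd x (by simp [hx])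
      by_cases hs : pvSepB c = true
      · rw [List.map_cons, pvWords, if_pos (by rw [hiff, hs]), pvTokens, if_pos hs]
        exact ih r (by simpa using hl) hdr
      · rw [Bool.not_eq_true] at hs
        rw [List.map_cons, pvWords, if_neg (by rw [hiff, hs]; simp),
          pvTokens, if_neg (by simp [hs]), pvSub3_id c hs, pvTW r hdr, pvDW r hdr]
        congr 1
        refine ih _ ?_ ?_
        · have := List.length_dropWhile_le (p := fun d => !pvSepB d) (l := r)
          simp at hl
          omega
        · intro x hx
          exact hdr x (List.dropWhile_sublist (p := fun d => !pvSepB d) (l := r) |>.mem hx)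

-- B's state machine, characterised: from a consistent state it appends the rendering
-- of the remaining tokens (continuing the current token first if the flag is set)
lemma pvMachine : ∀ (l : List Char) (acc : List Char) (b : Bool), (b = true → acc ≠ []) →
    (l.foldl (fun (st : List Char × Bool) ch =>
        if pvSepB ch then (st.1, false)
        else
          let out := if st.2 then st.1 else st.1 ++ (if st.1.isEmpty then ['#'] else [' ', '#'])
          (out ++ [PySem.Chars.lowerChar ch], true)) (acc, b)).1
      = acc ++ (if b then
            PySem.Chars.lower (l.takeWhile (fun d => !pvSepB d))
              ++ pvRender false (pvTokens (l.dropWhile (fun d => !pvSepB d)))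
          else pvRender acc.isEmpty (pvTokens l)) := by
  intro l
  induction l with
  | nil =>
    intro acc b _
    cases b <;> simp [pvRender, pvTokens, PySem.Chars.lower]
  | cons c r ih =>
    intro acc b hb
    rw [List.foldl_cons]
    by_cases hs : pvSepB c = true
    · simp only [hs, if_pos]
      rw [ih acc false (by simp)]
      cases b with
      | false =>
        rw [show pvTokens (c :: r) = pvTokens r from by rw [pvTokens, if_pos hs]]
        simp
      | true =>
        have hne : acc ≠ [] := hb rfl
        rw [List.takeWhile_cons_of_neg (by simp [hs]),
          List.dropWhile_cons_of_neg (by simp [hs]),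
          show pvTokens (c :: r) = pvTokens r from by rw [pvTokens, if_pos hs]]
        have he : acc.isEmpty = false := by
          cases acc with
          | nil => exact absurd rfl hne
          | cons a b => rfl
        rw [he]
        simp [PySem.Chars.lower]
    · rw [Bool.not_eq_true] at hs
      cases b with
      | true =>
        have hne : acc ≠ [] := hb rfl
        simp only [hs, Bool.false_eq_true, if_neg, not_false_iff, if_pos]
        rw [ih (acc ++ [PySem.Chars.lowerChar c]) true (by simp)]
        rw [List.takeWhile_cons_of_pos (by simp [hs]),
          List.dropWhile_cons_of_pos (by simp [hs])]
        simp [PySem.Chars.lower]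
      | false =>
        simp only [hs, Bool.false_eq_true, if_neg, not_false_iff]
        rw [ih (acc ++ (if acc.isEmpty then ['#'] else [' ', '#']) ++ [PySem.Chars.lowerChar c])
          true (by intro _ h; simpa using congrArg List.length h)]
        rw [show pvTokens (c :: r)
              = (c :: r.takeWhile (fun d => !pvSepB d)) :: pvTokens (r.dropWhile (fun d => !pvSepB d))
            from by rw [pvTokens, if_neg (by simp [hs])]]
        simp [pvRender, PySem.Chars.lower]
  
-- rendering after the first token, in closed form
lemma pvRender_false (ts : List (List Char)) :
    pvRender false ts = ts.flatMap (fun w => ' ' :: '#' :: PySem.Chars.lower w) := by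
  induction ts with
  | nil => rfl
  | cons t ts ih => rw [pvRender, ih]; simp

-- ' '.join of the hashtag pieces = the machine's rendering
lemma pvJoin_render (ts : List (List Char)) :
    PySem.Chars.join [' '] (ts.map (fun w => '#' :: PySem.Chars.lower w)) = pvRender true ts := by
  cases ts with
  | nil => rw [List.map_nil, PySem.Chars.join_nil]; rfl
  | cons t rest =>
    rw [pvRender, pvRender_false]
    induction rest generalizing t with
    | nil => rw [List.map_cons, List.map_nil, PySem.Chars.join_singleton]; simp
    | cons u us ih =>
      rw [List.map_cons, List.map_cons, PySem.Chars.join_cons_cons,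
        show ('#' :: PySem.Chars.lower u) :: List.map (fun w => '#' :: PySem.Chars.lower w) us
          = List.map (fun w => '#' :: PySem.Chars.lower w) (u :: us) from rfl,
        ih u]
      simp

-- ===== VERDICT (by name: the statement is the Claim_ definition above) =====
theorem format_hashtags_for_announcement_spec : Claim_equal_format_hashtags_for_announcement := by
  intro s hDom
  unfold Spec_format_hashtags_for_announcement
  have hdc : ∀ c ∈ s.toList, pvDomChar c = true := by
    intro c hc
    exact List.all_eq_true.mp hDom c hc
  by_cases hs : s = ""
  · subst hs
    rfl
  · -- B's side, characterised
    have hB : format_hashtags_for_announcement_alt s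
        = String.ofList (pvRender true (pvTokens s.toList)) := by
      unfold format_hashtags_for_announcement_alt
      rw [if_neg hs]
      show String.ofList (List.foldl _ ([], false) s.toList).1 = _
      rw [pvMachine s.toList [] false (by simp)]
      simp
    rw [hB]
    -- A's side
    unfold format_hashtags_for_announcement
    rw [if_neg hs]
    -- character-level images of the replace chain
    have hrep1 : (PySem.Str.replace s "'" " ").toList = s.toList.map (pvSub '\'') := by
      rw [PySem.Str.toList_replace]
      exact pvReplace_single '\'' ' ' s.toList
    have hrep2 : (PySem.Str.replace (PySem.Str.replace s "'" " ") "-" " ").toList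
        = (s.toList.map (pvSub '\'')).map (pvSub '-') := by
      rw [PySem.Str.toList_replace, hrep1]
      exact pvReplace_single '-' ' ' _
    set l2 := (s.toList.map (pvSub '\'')).map (pvSub '-') with hl2
    -- A's comma pieces
    have htl : (PySem.Str.split? (PySem.Str.replace (PySem.Str.replace s "'" " ") "-" " ") ",").getD []
        = List.map String.ofList (pvCommaSplit l2) := by
      rw [PySem.Str.split?, PySem.Chars.split?]
      simp only [hrep2]
      rw [if_neg (by simp)]
      rw [show ("," : String).toList = [','] from rfl]
      rw [pvSplitOn_comma]
      rfl
    simp only [htl]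
    -- A's nested loops, flattened
    rw [show (fun (acc : List String) tech =>
          (PySem.Str.split₀ (PySem.Str.strip tech)).foldl (fun acc2 t =>
            if PySem.Str.strip t ≠ "" then acc2 ++ [PySem.Str.strip t] else acc2) acc)
        = (fun acc tech => acc ++ PySem.Str.split₀ (PySem.Str.strip tech)) from by
      funext acc tech
      rw [pvInnerFold, pvPiece]]
    rw [PySem.List.foldl_append_eq_flatMap (fun tech => PySem.Str.split₀ (PySem.Str.strip tech)) _ []]
    rw [List.nil_append]
    set cleaned := (List.map String.ofList (pvCommaSplit l2)).flatMap
      (fun tech => PySem.Str.split₀ (PySem.Str.strip tech)) with hcleaned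
    -- the character-level word lists agree with B's tokens
    have hkey : List.map String.toList cleaned = pvTokens s.toList := by
      rw [hcleaned, List.map_flatMap, List.flatMap_map]
      rw [List.flatMap_congr (g := fun piece => pvWords piece) (by
        intro piece hpiece
        rw [pvWs, String.toList_ofList])]
      rw [pvTokenize l2.length l2 (le_refl _)]
      rw [show l2.map (pvSub ',') = s.toList.map pvSub3 from by
        rw [hl2, List.map_map, List.map_map]; rfl]
      exact pvTokens_eq s.toList.length s.toList (le_refl _) hdc
    -- every collected word is nonempty, so A's final filter is the identity
    have hfil : cleaned.filter (fun tech => decide (tech ≠ "")) = cleaned := by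
      apply List.filter_eq_self.mpr
      intro w hw
      rw [hcleaned] at hw
      obtain ⟨tech, _, hwt⟩ := List.mem_flatMap.mp hw
      obtain ⟨_, hne⟩ := pvPieceMem tech w hwt
      simpa using hne
    rw [hfil]
    -- compare as character lists
    apply pvToListInj
    rw [PySem.Str.toList_join, String.toList_ofList, List.map_map]
    rw [List.map_congr_left (l := cleaned)
      (f := String.toList ∘ fun tech => "#" ++ PySem.Str.lower tech)
      (g := (fun w => '#' :: PySem.Chars.lower w) ∘ String.toList)
      (fun t _ => by simp [Function.comp, PySem.Str.lower])]
    rw [← List.map_map, hkey]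
    rw [String.toList_ofList, pvJoin_render]
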